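-- pv_equiv track=rewrite | github.com/Roblibs/rovi_ros_ws | src/ros_ui_bridge/ros_ui_bridge/ros_metrics_node.py | _sanitize_topic_segment
-- ===== SOURCE A (Python) =====
-- def _sanitize_topic_segment(value: str) -> str:
--     """Sanitize a ROS topic segment.
--
--     ROS 2 topic segments should be composed of alphanumerics and underscores.
--     Frame ids are not guaranteed to follow that, so we map other characters to '_'.
--     """
--     s = str(value).strip()
--     if not s:
--         return 'unknown'
--     out_chars: list[str] = []
--     for ch in s:
--         if ch.isalnum() or ch == '_':
--             out_chars.append(ch)
--         else:
--             out_chars.append('_')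
--     out = ''.join(out_chars).strip('_')
--     if not out:
--         return 'unknown'
--     while '__' in out:
--         out = out.replace('__', '_')
--     return out
-- ===== SOURCE B (Python) =====
-- def _sanitize_topic_segment(value: str) -> str:
--     s = str(value).strip()
--     if not s:
--         return 'unknown'
--     chars = []
--     prev_underscore = True
--     for ch in s:
--         c = ch if (ch.isalnum() or ch == '_') else '_'
--         if c == '_':
--             if not prev_underscore:
--                 chars.append('_')
--                 prev_underscore = True
--         else:
--             chars.append(c)
--             prev_underscore = False
--     out = ''.join(chars).rstrip('_')
--     return out or 'unknown'
-- ===== Notes on version B (the rewrite author's own statement) =====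
-- stated objective: alternative
-- what changed: replaces A's map-then-strip('_')-then-iterated replace('__','_') pipeline with one stateful pass that suppresses leading and repeated underscores while copying, followed by a single rstrip('_')
import Mathlib
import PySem

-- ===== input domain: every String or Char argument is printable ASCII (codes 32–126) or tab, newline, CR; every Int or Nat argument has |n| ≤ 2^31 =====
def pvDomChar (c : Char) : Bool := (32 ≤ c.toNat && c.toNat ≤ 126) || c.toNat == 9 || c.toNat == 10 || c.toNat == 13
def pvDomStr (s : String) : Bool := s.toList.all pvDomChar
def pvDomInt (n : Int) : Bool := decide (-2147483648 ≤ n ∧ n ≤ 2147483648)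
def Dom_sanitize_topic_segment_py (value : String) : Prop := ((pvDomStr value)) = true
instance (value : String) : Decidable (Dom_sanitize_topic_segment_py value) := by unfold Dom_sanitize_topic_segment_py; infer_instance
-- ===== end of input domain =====

-- B replaces A's map / strip('_') / iterated replace('__','_') pipeline by a single
-- stateful pass plus one final rstrip('_'); same return value, no speed claim.

-- ===== PORT A =====
-- rep1 l is what ONE pass of l.replace('__','_') computes; it and the lemmas up to
-- rep1_length_lt exist only so that the while-loop of port A can cite them for termination.
def rep1 : List Char → List Char
  | [] => []
  | [c] => [c]
  | c :: d :: t => if c = '_' ∧ d = '_' then '_' :: rep1 t else c :: rep1 (d :: t)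

theorem rep1_cons_cons (c d : Char) (t : List Char) :
    rep1 (c :: d :: t) = if c = '_' ∧ d = '_' then '_' :: rep1 t else c :: rep1 (d :: t) := rfl

theorem rep1_cc (t : List Char) : rep1 ('_' :: '_' :: t) = '_' :: rep1 t := by
  rw [rep1_cons_cons, if_pos ⟨rfl, rfl⟩]

theorem rep1_cons_ne (c d : Char) (t : List Char) (h : ¬(c = '_' ∧ d = '_')) :
    rep1 (c :: d :: t) = c :: rep1 (d :: t) := by
  rw [rep1_cons_cons, if_neg h]

theorem replace_go_eq_rep1 (fuel : Nat) (l acc : List Char) (h : l.length ≤ fuel) :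
    PySem.Chars.replace.go ['_','_'] ['_'] fuel l acc = acc.reverse ++ rep1 l := by
  induction fuel generalizing l acc with
  | zero =>
    have : l = [] := List.eq_nil_of_length_eq_zero (Nat.le_zero.mp h)
    subst this; simp [PySem.Chars.replace.go, rep1]
  | succ n ih =>
    match l with
    | [] => simp [PySem.Chars.replace.go, rep1]
    | [c] =>
      have hpre : (['_','_'] : List Char).isPrefixOf [c] = false := by
        simp [List.isPrefixOf]
      simp only [PySem.Chars.replace.go, hpre, Bool.false_eq_true, if_false]
      rw [ih [] (c :: acc) (by simp)]
      simp [rep1]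
    | c :: d :: t =>
      by_cases hcd : c = '_' ∧ d = '_'
      · obtain ⟨hc, hd⟩ := hcd; subst hc; subst hd
        have hpre : (['_','_'] : List Char).isPrefixOf ('_' :: '_' :: t) = true := by
          rw [List.isPrefixOf_iff_prefix]; exact ⟨t, rfl⟩
        simp only [PySem.Chars.replace.go, hpre, if_true]
        rw [show List.drop (['_','_'] : List Char).length ('_' :: '_' :: t) = t from rfl,
            show (['_'] : List Char).reverse ++ acc = '_' :: acc from rfl]
        rw [ih t ('_' :: acc) (by simp at h ⊢; omega)]
        rw [rep1_cc]; simp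
      · have hpre : ¬ (['_','_'] : List Char).isPrefixOf (c :: d :: t) = true := by
          rw [List.isPrefixOf_iff_prefix]
          intro hp
          obtain ⟨r, hr⟩ := hp
          simp at hr
          exact hcd ⟨hr.1.symm, hr.2.1.symm⟩
        simp only [PySem.Chars.replace.go]
        rw [if_neg hpre]
        rw [ih (d :: t) (c :: acc) (by simp at h ⊢; omega)]
        rw [rep1_cons_ne c d t hcd]
        simp

theorem replace_underscores_eq_rep1 (l : List Char) :
    PySem.Chars.replace l ['_','_'] ['_'] = rep1 l := by
  simp only [PySem.Chars.replace]
  rw [if_neg (by simp)]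
  exact replace_go_eq_rep1 l.length l [] le_rfl

theorem rep1_length_le (l : List Char) : (rep1 l).length ≤ l.length := by
  induction l using rep1.induct with
  | case1 => simp [rep1]
  | case2 c => simp [rep1]
  | case3 c d t hcd ih =>
    obtain ⟨hc, hd⟩ := hcd; subst hc; subst hd
    rw [rep1_cc]; simp only [List.length_cons]; omega
  | case4 c d t hcd ih =>
    rw [rep1_cons_ne c d t hcd]
    simp only [List.length_cons] at ih ⊢; omega

theorem rep1_length_lt (l : List Char) (h : PySem.Chars.isIn ['_','_'] l = true) :
    (rep1 l).length < l.length := by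
  rw [PySem.Chars.isIn_iff_infix] at h
  induction l using rep1.induct with
  | case1 => exact absurd h.length_le (by simp)
  | case2 c => exact absurd h.length_le (by simp)
  | case3 c d t hcd ih =>
    obtain ⟨hc, hd⟩ := hcd; subst hc; subst hd
    have := rep1_length_le t
    rw [rep1_cc]; simp only [List.length_cons]; omega
  | case4 c d t hcd ih =>
    have hinf : ['_','_'] <:+: (d :: t) := by
      rcases List.infix_cons_iff.mp h with hp | hi
      · exfalso
        obtain ⟨r, hr⟩ := hp
        simp at hr
        exact hcd ⟨hr.1.symm, hr.2.1.symm⟩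
      · exact hi
    have hlt := ih hinf
    rw [rep1_cons_ne c d t hcd]
    simp only [List.length_cons] at hlt ⊢; omega

-- while '__' in out: out = out.replace('__', '_')
def pyCollapseLoop (out : List Char) : List Char :=
  if h : PySem.Chars.isIn ['_','_'] out = true then
    pyCollapseLoop (PySem.Chars.replace out ['_','_'] ['_'])
  else out
termination_by out.length
decreasing_by rw [replace_underscores_eq_rep1]; exact rep1_length_lt out h

def sanitize_topic_segment_py (value : String) : String :=
  let s := PySem.Chars.strip value.toList        -- str(value).strip()
  if s = [] then "unknown"
  else
    -- out_chars built left to right; ''.join(out_chars) is the same list of chars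
    let out_chars := s.foldl
      (fun acc ch => if PySem.Chars.isalnum ch || ch == '_' then acc ++ [ch] else acc ++ ['_'])
      ([] : List Char)
    let out := PySem.Chars.stripChars out_chars ['_']   -- .strip('_')
    if out = [] then "unknown"
    else String.ofList (pyCollapseLoop out)

-- ===== PORT B =====
def sanitize_topic_segment_py_alt (value : String) : String :=
  let s := PySem.Chars.strip value.toList        -- str(value).strip()
  if s = [] then "unknown"
  else
    -- single pass: state = (chars emitted so far, prev_underscore)
    let r := s.foldl
      (fun st ch =>
        let c := if PySem.Chars.isalnum ch || ch == '_' then ch else '_'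
        if c = '_' then (if st.2 then st else (st.1 ++ ['_'], true))
        else (st.1 ++ [c], false))
      (([] : List Char), true)
    -- ''.join(chars).rstrip('_'): hand port of rstrip with a chars argument (exact: drop the trailing run of '_')
    let out := (List.dropWhile (fun c => c == '_') r.1.reverse).reverse
    if out = [] then "unknown" else String.ofList out

-- ===== PRECONDITION & SPEC =====
def Spec_sanitize_topic_segment_py (value : String) (out : String) : Prop := out = sanitize_topic_segment_py_alt value
instance (value : String) (out : String) : Decidable (Spec_sanitize_topic_segment_py value out) := by unfold Spec_sanitize_topic_segment_py; infer_instance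

-- ===== CLAIM (what is proved, stated in full; the proofs are below) =====
def Claim_equal_sanitize_topic_segment_py : Prop := ∀ (value : String), Dom_sanitize_topic_segment_py value → Spec_sanitize_topic_segment_py value (sanitize_topic_segment_py value)

-- ===== LEMMAS AND PROOFS =====

-- the character map both programs apply
def fmap (ch : Char) : Char := if PySem.Chars.isalnum ch || ch == '_' then ch else '_'

-- canonical form: collapse every run of '_' into a single '_'
def collapse : List Char → List Char
  | [] => []
  | [c] => [c]
  | c :: d :: t => if c = '_' ∧ d = '_' then collapse (d :: t) else c :: collapse (d :: t)

-- drop a leading run of '_'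
def dropU (l : List Char) : List Char := List.dropWhile (fun c => c == '_') l

-- drop a trailing run of '_', head-recursively
def rstripR : List Char → List Char
  | [] => []
  | c :: t => if rstripR t = [] ∧ c = '_' then [] else c :: rstripR t

-- what B's fold emits over the mapped characters
def emitU : Bool → List Char → List Char
  | _, [] => []
  | b, c :: t => if c = '_' then (if b then emitU true t else '_' :: emitU true t) else c :: emitU false t

theorem collapse_cons_cons (c d : Char) (t : List Char) :
    collapse (c :: d :: t) = if c = '_' ∧ d = '_' then collapse (d :: t) else c :: collapse (d :: t) := rfl

theorem collapse_cc (t : List Char) : collapse ('_' :: '_' :: t) = collapse ('_' :: t) := by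
  rw [collapse_cons_cons, if_pos ⟨rfl, rfl⟩]

theorem collapse_cons_ne (c d : Char) (t : List Char) (h : ¬(c = '_' ∧ d = '_')) :
    collapse (c :: d :: t) = c :: collapse (d :: t) := by
  rw [collapse_cons_cons, if_neg h]

theorem collapse_head (l : List Char) : (collapse l).head? = l.head? := by
  induction l using collapse.induct with
  | case1 => rfl
  | case2 c => rfl
  | case3 c d t hcd ih =>
    obtain ⟨hc, hd⟩ := hcd; subst hc; subst hd
    rw [collapse_cc, ih]; rfl
  | case4 c d t hcd ih =>
    rw [collapse_cons_ne c d t hcd]; rfl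

theorem collapse_eq_nil_iff (l : List Char) : collapse l = [] ↔ l = [] := by
  induction l using collapse.induct with
  | case1 => simp [collapse]
  | case2 c => simp [collapse]
  | case3 c d t hcd ih =>
    obtain ⟨hc, hd⟩ := hcd; subst hc; subst hd
    rw [collapse_cc, ih]; simp
  | case4 c d t hcd ih =>
    rw [collapse_cons_ne c d t hcd]; simp

theorem collapse_cons_head (d : Char) (t : List Char) : ∃ u, collapse (d :: t) = d :: u := by
  have h := collapse_head (d :: t)
  cases hc : collapse (d :: t) with
  | nil => rw [hc] at h; simp at h
  | cons e u => rw [hc] at h; simp at h; exact ⟨u, by rw [h]⟩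

theorem rep1_head (l : List Char) : (rep1 l).head? = l.head? := by
  induction l using rep1.induct with
  | case1 => rfl
  | case2 c => rfl
  | case3 c d t hcd ih =>
    obtain ⟨hc, hd⟩ := hcd; subst hc; subst hd
    rw [rep1_cc]; rfl
  | case4 c d t hcd ih =>
    rw [rep1_cons_ne c d t hcd]; rfl

theorem rep1_cons_head (d : Char) (t : List Char) : ∃ u, rep1 (d :: t) = d :: u := by
  have h := rep1_head (d :: t)
  cases hc : rep1 (d :: t) with
  | nil => rw [hc] at h; simp at h
  | cons e u => rw [hc] at h; simp at h; exact ⟨u, by rw [h]⟩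

theorem dropU_underscore (l : List Char) : dropU ('_' :: l) = dropU l := by
  simp [dropU]

theorem dropU_cons_ne (c : Char) (l : List Char) (h : c ≠ '_') : dropU (c :: l) = c :: l := by
  simp [dropU, h]

theorem collapse_cons_ne' (c : Char) (t : List Char) (hc : c ≠ '_') :
    collapse (c :: t) = c :: collapse t := by
  cases t with
  | nil => rfl
  | cons d u => exact collapse_cons_ne c d u (fun h => hc h.1)

-- collapse commutes with dropping the leading '_' run
theorem collapse_dropU (l : List Char) : collapse (dropU l) = dropU (collapse l) := by
  induction l using collapse.induct with
  | case1 => rfl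
  | case2 c => by_cases hc : c = '_' <;> simp [collapse, dropU, hc]
  | case3 c d t hcd ih =>
    obtain ⟨hc, hd⟩ := hcd; subst hc; subst hd
    rw [collapse_cc, dropU_underscore]
    exact ih
  | case4 c d t hcd ih =>
    by_cases hc : c = '_'
    · subst hc
      have hd : d ≠ '_' := fun h => hcd ⟨rfl, h⟩
      obtain ⟨u, hu⟩ := collapse_cons_head d t
      rw [collapse_cons_ne _ _ _ hcd, dropU_underscore, dropU_cons_ne d t hd, hu,
          dropU_underscore, dropU_cons_ne d u hd]
    · rw [dropU_cons_ne c (d :: t) hc, collapse_cons_ne c d t hcd,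
          dropU_cons_ne c (collapse (d :: t)) hc]

theorem collapse_underscore_cons (t : List Char) :
    collapse ('_' :: t) = '_' :: collapse (dropU t) := by
  induction t with
  | nil => rfl
  | cons e u ih =>
    by_cases he : e = '_'
    · subst he
      rw [collapse_cc, ih, dropU_underscore]
    · rw [collapse_cons_ne '_' e u (fun h => he h.2), dropU_cons_ne e u he]

-- collapse is invariant under one replace pass
theorem collapse_rep1 (l : List Char) : collapse (rep1 l) = collapse l := by
  induction l using rep1.induct with
  | case1 => rfl
  | case2 c => rfl
  | case3 c d t hcd ih =>
    obtain ⟨hc, hd⟩ := hcd; subst hc; subst hd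
    rw [rep1_cc, collapse_cc, collapse_underscore_cons, collapse_underscore_cons]
    congr 1
    rw [collapse_dropU, collapse_dropU, ih]
  | case4 c d t hcd ih =>
    rw [rep1_cons_ne c d t hcd]
    obtain ⟨u, hu⟩ := rep1_cons_head d t
    rw [hu, collapse_cons_cons, collapse_cons_cons, if_neg hcd, if_neg hcd]
    congr 1
    rw [← hu, ih]

theorem collapse_of_no_infix (l : List Char) (h : ¬ (['_','_'] <:+: l)) : collapse l = l := by
  induction l using collapse.induct with
  | case1 => rfl
  | case2 c => rfl
  | case3 c d t hcd ih =>
    exact absurd ⟨[], t, by simp [hcd.1, hcd.2]⟩ h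
  | case4 c d t hcd ih =>
    rw [collapse_cons_ne c d t hcd]
    have hni : ¬ (['_','_'] <:+: (d :: t)) := by
      intro hi
      obtain ⟨x, y, hxy⟩ := hi
      exact h ⟨c :: x, y, by rw [← hxy]; simp⟩
    rw [ih hni]

theorem pyCollapseLoop_eq_collapse (l : List Char) : pyCollapseLoop l = collapse l := by
  induction l using pyCollapseLoop.induct with
  | case1 out h ih =>
    rw [pyCollapseLoop, dif_pos h, ih, replace_underscores_eq_rep1, collapse_rep1]
  | case2 out h =>
    rw [pyCollapseLoop, dif_neg h]
    have h' : PySem.Chars.isIn ['_','_'] out = false := Bool.eq_false_iff.mpr h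
    have hni : ¬ (['_','_'] <:+: out) := by
      rw [← PySem.Chars.isIn_iff_infix, h']; simp
    exact (collapse_of_no_infix out hni).symm

theorem emitU_false_cons (c : Char) (t : List Char) :
    emitU false (c :: t) = if c = '_' then '_' :: emitU true t else c :: emitU false t := rfl

theorem emitU_true_cons (c : Char) (t : List Char) :
    emitU true (c :: t) = if c = '_' then emitU true t else c :: emitU false t := rfl

-- B's emitter in terms of collapse
theorem emitU_eq_collapse (l : List Char) :
    emitU false l = collapse l ∧ emitU true l = collapse (dropU l) := by
  induction l with
  | nil => exact ⟨rfl, rfl⟩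
  | cons c t ih =>
    by_cases hc : c = '_'
    · subst hc
      constructor
      · rw [emitU_false_cons, if_pos rfl, ih.2, collapse_underscore_cons]
      · rw [emitU_true_cons, if_pos rfl, ih.2, dropU_underscore]
    · constructor
      · rw [emitU_false_cons, if_neg hc, ih.1, collapse_cons_ne' c t hc]
      · rw [emitU_true_cons, if_neg hc, ih.1, dropU_cons_ne c t hc, collapse_cons_ne' c t hc]

theorem rstripR_cons (c : Char) (t : List Char) :
    rstripR (c :: t) = if rstripR t = [] ∧ c = '_' then [] else c :: rstripR t := rfl

theorem rstripR_cons_of_ne {c : Char} {t : List Char} (h : rstripR (c :: t) ≠ []) :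
    rstripR (c :: t) = c :: rstripR t := by
  by_cases h1 : rstripR t = [] ∧ c = '_'
  · rw [rstripR_cons, if_pos h1] at h; exact absurd rfl h
  · rw [rstripR_cons, if_neg h1]

-- rstrip('_') via reverse/dropWhile equals the recursive rstripR
theorem rstrip_reverse_eq (l : List Char) :
    (List.dropWhile (fun c => c == '_') l.reverse).reverse = rstripR l := by
  induction l with
  | nil => rfl
  | cons c t ih =>
    rw [List.reverse_cons, List.dropWhile_append, rstripR_cons]
    by_cases hnil : rstripR t = []
    · have he : (List.dropWhile (fun c => c == '_') t.reverse) = [] := by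
        have h2 := congrArg List.reverse ih
        rw [hnil] at h2
        simpa using h2
      rw [he]
      by_cases hc : c = '_' <;> simp [hnil, hc]
    · have hne : (List.dropWhile (fun c => c == '_') t.reverse) ≠ [] := by
        intro h0
        apply hnil; rw [← ih, h0]; rfl
      rw [if_neg (by simpa using hne), if_neg (by simp [hnil])]
      simp [← ih]

theorem stripChars_underscore_eq (l : List Char) :
    PySem.Chars.stripChars l ['_'] = rstripR (dropU l) := by
  simp only [PySem.Chars.stripChars]
  have hp : (fun c => (['_'] : List Char).contains c) = (fun c => c == '_') := by
    funext c
    show ((c == '_') || false) = (c == '_')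
    exact Bool.or_false _
  rw [hp]
  exact rstrip_reverse_eq (dropU l)

-- collapse commutes with dropping the trailing '_' run
theorem collapse_rstripR (l : List Char) : rstripR (collapse l) = collapse (rstripR l) := by
  induction l using collapse.induct with
  | case1 => rfl
  | case2 c =>
    by_cases hc : c = '_'
    · subst hc
      rw [show collapse ['_'] = ['_'] from rfl,
          show rstripR ['_'] = [] from by rw [rstripR_cons, if_pos ⟨rfl, rfl⟩]]
      rfl
    · have h2 : rstripR [c] = [c] := by
        rw [rstripR_cons, if_neg (fun hh => hc hh.2)]; rfl
      rw [show collapse [c] = [c] from rfl, h2]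
      rfl
  | case3 c d t hcd ih =>
    obtain ⟨hc, hd⟩ := hcd; subst hc; subst hd
    rw [collapse_cc]
    by_cases h1 : rstripR ('_' :: t) = []
    · have h2 : rstripR ('_' :: '_' :: t) = [] := by
        rw [rstripR_cons, if_pos ⟨h1, rfl⟩]
      rw [ih, h1, h2]
    · have h3 := rstripR_cons_of_ne h1
      have h4 : rstripR ('_' :: '_' :: t) = '_' :: rstripR ('_' :: t) := by
        rw [rstripR_cons ('_') ('_' :: t), if_neg (fun hh => h1 hh.1)]
      rw [ih, h3, h4, h3, collapse_cc]
  | case4 c d t hcd ih =>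
    rw [collapse_cons_ne c d t hcd]
    by_cases h1 : rstripR (d :: t) = [] ∧ c = '_'
    · obtain ⟨hnil, hc⟩ := h1; subst hc
      have hcolnil : rstripR (collapse (d :: t)) = [] := by rw [ih, hnil]; rfl
      have hl : rstripR ('_' :: collapse (d :: t)) = [] := by
        rw [rstripR_cons, if_pos ⟨hcolnil, rfl⟩]
      have hr : rstripR ('_' :: d :: t) = [] := by
        rw [rstripR_cons, if_pos ⟨hnil, rfl⟩]
      rw [hl, hr]; rfl
    · have hlne : rstripR (collapse (d :: t)) = [] ↔ rstripR (d :: t) = [] := by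
        constructor
        · intro h0
          rw [ih] at h0
          by_contra hne2
          rw [rstripR_cons_of_ne hne2] at h0
          exact absurd ((collapse_eq_nil_iff _).mp h0) (by simp)
        · intro h0; rw [ih, h0]; rfl
      have hlcons : rstripR (c :: collapse (d :: t)) = c :: rstripR (collapse (d :: t)) := by
        rw [rstripR_cons, if_neg (fun hh => h1 ⟨hlne.mp hh.1, hh.2⟩)]
      have hrcons : rstripR (c :: d :: t) = c :: rstripR (d :: t) := by
        rw [rstripR_cons, if_neg h1]
      rw [hlcons, hrcons, ih]
      by_cases hnil : rstripR (d :: t) = []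
      · rw [hnil]; rfl
      · rw [rstripR_cons_of_ne hnil, collapse_cons_ne c d (rstripR t) hcd,
            ← rstripR_cons_of_ne hnil]

-- A's fold is a map
theorem foldA_eq_map (s : List Char) (acc : List Char) :
    s.foldl (fun acc ch => if PySem.Chars.isalnum ch || ch == '_' then acc ++ [ch] else acc ++ ['_']) acc
      = acc ++ s.map fmap := by
  induction s generalizing acc with
  | nil => simp
  | cons c t ih =>
    simp only [List.foldl_cons, List.map_cons]
    rw [ih]
    by_cases h : PySem.Chars.isalnum c || c == '_'
    · simp [h, fmap]
    · simp [h, fmap]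

-- B's fold emits emitU over the mapped characters
theorem foldB_eq_emitU (s : List Char) (acc : List Char) (b : Bool) :
    (s.foldl
      (fun st ch =>
        let c := if PySem.Chars.isalnum ch || ch == '_' then ch else '_'
        if c = '_' then (if st.2 then st else (st.1 ++ ['_'], true))
        else (st.1 ++ [c], false)) (acc, b)).1 = acc ++ emitU b (s.map fmap) := by
  induction s generalizing acc b with
  | nil => simp [emitU]
  | cons c t ih =>
    simp only [List.foldl_cons, List.map_cons]
    by_cases hc : fmap c = '_'
    · rw [show (if PySem.Chars.isalnum c || c == '_' then c else '_') = fmap c from rfl]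
      cases b with
      | true =>
        simp only [hc, if_pos rfl]
        rw [ih]
        simp [emitU, hc]
      | false =>
        simp only [hc, if_pos rfl]
        rw [ih]
        simp [emitU, hc]
    · rw [show (if PySem.Chars.isalnum c || c == '_' then c else '_') = fmap c from rfl]
      rw [if_neg hc, ih]
      simp [emitU, hc]

-- ===== VERDICT (by name: the statement is the Claim_ definition above) =====
theorem sanitize_topic_segment_py_spec : Claim_equal_sanitize_topic_segment_py := by
  intro value _
  unfold Spec_sanitize_topic_segment_py sanitize_topic_segment_py sanitize_topic_segment_py_alt
  simp only
  by_cases hs : PySem.Chars.strip value.toList = []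
  · simp [hs]
  · rw [if_neg hs, if_neg hs]
    set s := PySem.Chars.strip value.toList with hsdef
    set m := s.map fmap with hm
    rw [foldA_eq_map s [], foldB_eq_emitU s [] true]
    simp only [List.nil_append, ← hm]
    rw [stripChars_underscore_eq, (emitU_eq_collapse m).2]
    rw [rstrip_reverse_eq, collapse_rstripR]
    set q := rstripR (dropU m) with hq
    by_cases hqnil : q = []
    · rw [if_pos hqnil, if_pos (by rw [hqnil]; rfl)]
    · rw [if_neg hqnil, if_neg (fun h => hqnil ((collapse_eq_nil_iff q).mp h))]
      rw [pyCollapseLoop_eq_collapse]
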